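-- pv_equiv track=rewrite | github.com/Krarilotus/marjapussi-ki | policy.py | _convert_prov_history_to_steps
-- ===== SOURCE A (Python) =====
-- def _convert_prov_history_to_steps(p):
--     p = [(-1, 115)] + p
--     for i, pr in enumerate(p):
--         if pr[1] == 0:
--             p[i] = (p[i][0], p[i - 1][1])
--     steps = [(n, j - i) for n, i, j in zip(list(zip(*p))[0][1:], list(zip(*p))[1][:-1], list(zip(*p))[1][1:])]
--     steps_player_num = {playernum: [s for p, s in steps if p == playernum] for playernum in range(4)}
--     return steps_player_num
-- ===== SOURCE B (Python) =====
-- def _convert_prov_history_to_steps(p):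
--     result = {0: [], 1: [], 2: [], 3: []}
--     prev = 115
--     for n, v in p:
--         if v == 0:
--             v = prev
--         if n in result:
--             result[n].append(v - prev)
--         prev = v
--     return result
-- ===== Notes on version B (the rewrite author's own statement) =====
-- stated objective: simpler
-- what changed: Replaced prepend+in-place zero-fix pass, zip-transpose steps pass and four filtering dict-comprehension rescans with one forward loop that buckets each step difference directly while carrying the previous value.
import Mathlib
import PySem

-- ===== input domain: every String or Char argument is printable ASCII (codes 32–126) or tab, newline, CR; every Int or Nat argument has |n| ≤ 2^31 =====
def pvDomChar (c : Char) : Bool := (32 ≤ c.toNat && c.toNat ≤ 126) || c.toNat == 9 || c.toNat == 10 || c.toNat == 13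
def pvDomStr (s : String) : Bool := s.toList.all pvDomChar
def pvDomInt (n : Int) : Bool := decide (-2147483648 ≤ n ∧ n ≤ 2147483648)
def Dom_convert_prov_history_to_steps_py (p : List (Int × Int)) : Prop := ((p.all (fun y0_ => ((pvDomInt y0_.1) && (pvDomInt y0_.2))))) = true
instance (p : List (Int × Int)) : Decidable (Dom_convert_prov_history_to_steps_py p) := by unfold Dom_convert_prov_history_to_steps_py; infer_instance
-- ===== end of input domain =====

-- B replaces A's prepend + in-place zero-fix pass + zip-transpose steps list + four
-- filtering dict rescans by one forward loop bucketing each difference directly (simpler).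

-- ===== PORT A =====
-- the body of "for i, pr in enumerate(p): if pr[1] == 0: p[i] = (p[i][0], p[i-1][1])"
def aStep (acc : List (Int × Int)) (i : Nat) : List (Int × Int) :=
  match PySem.List.pyGet? acc (i : Int) with
  | some pr =>
    if pr.2 = 0 then
      match PySem.List.pyGet? acc ((i : Int) - 1) with
      | some prevPr => acc.set i (pr.1, prevPr.2)
      | none => acc
    else acc
  | none => acc

def convert_prov_history_to_steps_py (p : List (Int × Int)) : List (Int × List Int) :=
  let p1 : List (Int × Int) := ((-1 : Int), (115 : Int)) :: p
  let p2 := (List.range p1.length).foldl aStep p1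
  let names := (p2.map Prod.fst).drop 1                 -- list(zip(*p))[0][1:]
  let vals := p2.map Prod.snd                           -- list(zip(*p))[1]
  let steps := (List.zip names (List.zip vals.dropLast (vals.drop 1))).map
      (fun t => (t.1, t.2.2 - t.2.1))
  (PySem.List.pyRange 0 4 1).map
      (fun k => (k, (steps.filter (fun s => s.1 = k)).map Prod.snd))

-- ===== PORT B =====
def altLoop : Int → List Int → List Int → List Int → List Int → List (Int × Int) →
    List Int × List Int × List Int × List Int
  | _, r0, r1, r2, r3, [] => (r0, r1, r2, r3)
  | prev, r0, r1, r2, r3, (n, v) :: t =>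
    let v' := if v = 0 then prev else v
    if n = 0 then altLoop v' (r0 ++ [v' - prev]) r1 r2 r3 t
    else if n = 1 then altLoop v' r0 (r1 ++ [v' - prev]) r2 r3 t
    else if n = 2 then altLoop v' r0 r1 (r2 ++ [v' - prev]) r3 t
    else if n = 3 then altLoop v' r0 r1 r2 (r3 ++ [v' - prev]) t
    else altLoop v' r0 r1 r2 r3 t

def convert_prov_history_to_steps_py_alt (p : List (Int × Int)) : List (Int × List Int) :=
  match altLoop 115 [] [] [] [] p with
  | (r0, r1, r2, r3) => [(0, r0), (1, r1), (2, r2), (3, r3)]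

-- ===== PRECONDITION & SPEC =====
def Spec_convert_prov_history_to_steps_py (p : List (Int × Int)) (out : List (Int × List Int)) : Prop := out = convert_prov_history_to_steps_py_alt p
instance (p : List (Int × Int)) (out : List (Int × List Int)) : Decidable (Spec_convert_prov_history_to_steps_py p out) := by unfold Spec_convert_prov_history_to_steps_py; infer_instance

-- ===== CLAIM (what is proved, stated in full; the proofs are below) =====
def Claim_equal_convert_prov_history_to_steps_py : Prop := ∀ (p : List (Int × Int)), Dom_convert_prov_history_to_steps_py p → Spec_convert_prov_history_to_steps_py p (convert_prov_history_to_steps_py p)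

-- ===== LEMMAS AND PROOFS =====

-- the zero-fix pass as a forward scan carrying the previous value
def fixScan : Int → List (Int × Int) → List (Int × Int)
  | _, [] => []
  | prev, (n, v) :: t => let v' := if v = 0 then prev else v; (n, v') :: fixScan v' t

-- per-step differences after the zero fix
def stepsOf : Int → List (Int × Int) → List (Int × Int)
  | _, [] => []
  | prev, (n, v) :: t => let v' := if v = 0 then prev else v; (n, v' - prev) :: stepsOf v' t

theorem fold_fix (suf : List (Int × Int)) :
    ∀ (pre : List (Int × Int)) (m : Int × Int), pre.getLast? = some m →
    (List.range' pre.length suf.length).foldl aStep (pre ++ suf) =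
      pre ++ fixScan m.2 suf := by
  induction suf with
  | nil => intro pre m _; simp [fixScan]
  | cons hd tl ih =>
    intro pre m hm
    obtain ⟨n, v⟩ := hd
    have hpre : pre ≠ [] := by intro h; simp [h] at hm
    have hlen : 1 ≤ pre.length := List.length_pos_of_ne_nil hpre
    rw [List.length_cons, List.range'_succ, List.foldl_cons]
    have hget : PySem.List.pyGet? (pre ++ (n, v) :: tl) (pre.length : Int) = some (n, v) :=
      PySem.List.pyGet?_append_length _ _ _
    have hgetprev : PySem.List.pyGet? (pre ++ (n, v) :: tl) ((pre.length : Int) - 1) =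
        some m := by
      have : ((pre.length : Int) - 1) = ((pre.length - 1 : Nat) : Int) := by omega
      rw [this, PySem.List.pyGet?_natCast]
      rw [List.getElem?_append_left (by omega)]
      rw [← List.getLast?_eq_getElem?]; exact hm
    by_cases hv : v = 0
    · subst hv
      have hset : (pre ++ (n, 0) :: tl).set pre.length (n, m.2) =
          (pre ++ [(n, m.2)]) ++ tl := by
        rw [List.set_append_right _ _ (le_refl _)]
        simp
      have hstep : aStep (pre ++ (n, 0) :: tl) pre.length = (pre ++ [(n, m.2)]) ++ tl := by
        rw [aStep, hget]; simp [hgetprev, hset]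
      rw [hstep]
      have := ih (pre ++ [(n, m.2)]) (n, m.2) (by simp)
      simp only [List.length_append, List.length_cons, List.length_nil] at this ⊢
      rw [this]
      simp [fixScan]
    · have hstep : aStep (pre ++ (n, v) :: tl) pre.length = pre ++ (n, v) :: tl := by
        rw [aStep, hget]; simp [hv]
      rw [hstep]
      have h2 : pre ++ (n, v) :: tl = (pre ++ [(n, v)]) ++ tl := by simp
      rw [h2]
      have := ih (pre ++ [(n, v)]) (n, v) (by simp)
      simp only [List.length_append, List.length_cons, List.length_nil] at this ⊢
      rw [this]
      simp [fixScan, hv]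

theorem steps_eq (l : List (Int × Int)) :
    ∀ pv : Int,
    (List.zip ((fixScan pv l).map Prod.fst)
      (List.zip ((pv :: (fixScan pv l).map Prod.snd).dropLast) ((fixScan pv l).map Prod.snd))).map
      (fun t => (t.1, t.2.2 - t.2.1)) = stepsOf pv l := by
  induction l with
  | nil => intro pv; simp [fixScan, stepsOf]
  | cons hd tl ih =>
    intro pv
    obtain ⟨n, v⟩ := hd
    simp only [fixScan, stepsOf]
    cases htl : fixScan (if v = 0 then pv else v) tl with
    | nil => simp [← htl, ih]
    | cons a b => simp [← htl, ih]

theorem altLoop_eq (l : List (Int × Int)) :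
    ∀ (pv : Int) (r0 r1 r2 r3 : List Int),
    altLoop pv r0 r1 r2 r3 l =
      (r0 ++ ((stepsOf pv l).filter (fun s => s.1 = 0)).map Prod.snd,
       r1 ++ ((stepsOf pv l).filter (fun s => s.1 = 1)).map Prod.snd,
       r2 ++ ((stepsOf pv l).filter (fun s => s.1 = 2)).map Prod.snd,
       r3 ++ ((stepsOf pv l).filter (fun s => s.1 = 3)).map Prod.snd) := by
  induction l with
  | nil => intro pv r0 r1 r2 r3; simp [altLoop, stepsOf]
  | cons hd tl ih =>
    intro pv r0 r1 r2 r3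
    obtain ⟨n, v⟩ := hd
    simp only [altLoop, stepsOf]
    by_cases h0 : n = 0
    · simp [h0, ih]
    · by_cases h1 : n = 1
      · simp [h1, ih]
      · by_cases h2 : n = 2
        · simp [h2, ih]
        · by_cases h3 : n = 3
          · simp [h3, ih]
          · simp [h0, h1, h2, h3, ih]

-- ===== VERDICT (by name: the statement is the Claim_ definition above) =====
theorem convert_prov_history_to_steps_py_spec : Claim_equal_convert_prov_history_to_steps_py := by
  intro p _
  unfold Spec_convert_prov_history_to_steps_py
  simp only [convert_prov_history_to_steps_py, convert_prov_history_to_steps_py_alt]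
  have hfold : (List.range (((-1 : Int), (115 : Int)) :: p).length).foldl aStep
      (((-1 : Int), (115 : Int)) :: p) = ((-1 : Int), (115 : Int)) :: fixScan 115 p := by
    rw [List.length_cons, List.range_eq_range', List.range'_succ, List.foldl_cons]
    have h0 : aStep (((-1 : Int), (115 : Int)) :: p) 0 = ((-1 : Int), (115 : Int)) :: p := by
      rw [aStep]
      simp
    rw [h0]
    have := fold_fix p [((-1 : Int), (115 : Int))] ((-1 : Int), (115 : Int)) rfl
    simpa using this
  rw [hfold]
  simp only [List.map_cons, List.drop_succ_cons, List.drop_zero]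
  rw [steps_eq p 115]
  rw [altLoop_eq p 115 [] [] [] []]
  have hr : PySem.List.pyRange 0 4 1 = [0, 1, 2, 3] := by decide
  rw [hr]
  simp
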